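-- pv_equiv track=rewrite | github.com/pypi-data/pypi-mirror-3 | packages/lizpop/lizpop-0.4.0.tar.gz/lizpop-0.4.0/lizpop/clformat.py | do_comma
-- ===== SOURCE A (Python) =====
-- def do_comma(nstr, comma_char=u",", interval=3):
--   if interval < 1 : return nstr
--   slist = []
--   while True:
--     if len(nstr) <= interval:
--       slist.insert(0, nstr)
--       break
--     slist.insert(0, nstr[-interval: ])
--     nstr = nstr[: -interval]
--   return comma_char.join(slist)
-- ===== SOURCE B (Python) =====
-- def do_comma(nstr, comma_char=u",", interval=3):
--   if interval < 1: return nstr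
--   first = len(nstr) % interval or interval
--   groups = [nstr[:first]] + [nstr[i:i+interval] for i in range(first, len(nstr), interval)]
--   return comma_char.join(groups)
-- ===== Notes on version B (the rewrite author's own statement) =====
-- stated objective: alternative
-- what changed: Replaces the right-to-left while loop that repeatedly slices interval characters off the end and prepends them with a single left-to-right pass: the leading group length is computed in closed form (len % interval or interval) and the remaining groups are forward slices over a range, then joined.
import Mathlib
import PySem

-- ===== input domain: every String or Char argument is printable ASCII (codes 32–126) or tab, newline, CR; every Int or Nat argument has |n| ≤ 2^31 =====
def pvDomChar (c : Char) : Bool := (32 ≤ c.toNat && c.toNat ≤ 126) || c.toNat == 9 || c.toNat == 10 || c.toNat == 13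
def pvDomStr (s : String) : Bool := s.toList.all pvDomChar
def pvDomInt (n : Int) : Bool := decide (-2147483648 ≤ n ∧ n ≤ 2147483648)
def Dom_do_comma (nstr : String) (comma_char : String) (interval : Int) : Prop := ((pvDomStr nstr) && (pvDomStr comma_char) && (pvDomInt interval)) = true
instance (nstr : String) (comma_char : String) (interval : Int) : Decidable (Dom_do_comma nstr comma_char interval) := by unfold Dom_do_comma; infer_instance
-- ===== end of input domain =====

-- B replaces A's right-to-left while loop (repeatedly chopping `interval` chars off the end)
-- with a single left-to-right pass: closed-form leading-group length, forward slices, join.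

-- ===== PORT A =====
-- A's while loop: chop nstr[-interval:] off the right, insert at front of slist.
-- The proof argument `h1` only justifies termination (A reaches the loop only when 1 ≤ interval).
def doCommaLoop (interval : Int) (h1 : 1 ≤ interval) (l : List Char) (slist : List (List Char)) : List (List Char) :=
  if (l.length : Int) ≤ interval then l :: slist
  else doCommaLoop interval h1 (PySem.List.slice l none (some (-interval)))
        (PySem.List.slice l (some (-interval)) none :: slist)
termination_by l.length
decreasing_by
  rename_i hgt
  rw [show interval = ((interval.toNat : Nat) : Int) by omega,
      PySem.List.slice_to_neg_natCast l interval.toNat (by omega)]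
  simp only [List.length_take]
  omega

def do_comma (nstr : String) (comma_char : String) (interval : Int) : String :=
  if h : interval < 1 then nstr
  else String.ofList
    (PySem.Chars.join comma_char.toList (doCommaLoop interval (by omega) nstr.toList []))

-- ===== PORT B =====
-- first = len(nstr) % interval or interval; groups = [nstr[:first]] ++ forward slices; join.
def do_comma_alt (nstr : String) (comma_char : String) (interval : Int) : String :=
  if interval < 1 then nstr
  else
    let s := nstr.toList
    let m := PySem.Int.mod (s.length : Int) interval
    let first := if m = 0 then interval else m
    let groups := PySem.List.slice s none (some first) ::
      (PySem.List.pyRange first (s.length : Int) interval).map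
        (fun i => PySem.List.slice s (some i) (some (i + interval)))
    String.ofList (PySem.Chars.join comma_char.toList groups)

-- ===== PRECONDITION & SPEC =====
def Spec_do_comma (nstr : String) (comma_char : String) (interval : Int) (out : String) : Prop := out = do_comma_alt nstr comma_char interval
instance (nstr : String) (comma_char : String) (interval : Int) (out : String) : Decidable (Spec_do_comma nstr comma_char interval out) := by unfold Spec_do_comma; infer_instance

-- ===== CLAIM (what is proved, stated in full; the proofs are below) =====
def Claim_equal_do_comma : Prop := ∀ (nstr : String) (comma_char : String) (interval : Int), Dom_do_comma nstr comma_char interval → Spec_do_comma nstr comma_char interval (do_comma nstr comma_char interval)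


-- ===== LEMMAS AND PROOFS =====

-- proof-side normal form: the list of groups, built left-to-right
def chunksOf (k : Nat) (hk : 0 < k) : List Char → List (List Char)
  | [] => []
  | c :: t => (c :: t).take k :: chunksOf k hk ((c :: t).drop k)
termination_by l => l.length
decreasing_by
  simp only [List.length_drop, List.length_cons]
  omega

def firstLen (k n : Nat) : Nat := if n % k = 0 then k else n % k

lemma firstLen_mod (k n : Nat) (_hk : 0 < k) : (n - firstLen k n) % k = 0 := by
  unfold firstLen
  split_ifs with h
  · rcases Nat.lt_or_ge n k with hlt | hge
    · have : n = 0 := by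
        have := Nat.mod_eq_of_lt hlt
        omega
      simp [this]
    · have : (n - k) % k = n % k := by
        conv_rhs => rw [show n = (n - k) + k by omega]
        rw [Nat.add_mod_right]
      omega
  · have hmle : n % k ≤ n := Nat.mod_le n k
    have : n - n % k = k * (n / k) := by
      have := Nat.div_add_mod n k
      omega
    rw [this, Nat.mul_mod_right]

lemma firstLen_ge_of_le (k n : Nat) (_hk : 0 < k) (h : n ≤ k) : n ≤ firstLen k n := by
  unfold firstLen
  split_ifs with hm
  · exact h
  · rcases Nat.lt_or_ge n k with hlt | hge
    · rw [Nat.mod_eq_of_lt hlt]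
    · have hnk : n = k := by omega
      exact (hm (by rw [hnk, Nat.mod_self])).elim

lemma firstLen_le_sub (k n : Nat) (_hk : 0 < k) (h : k < n) : firstLen k n ≤ n - k := by
  have hmod : (n - k) % k = n % k := by
    conv_rhs => rw [show n = (n - k) + k by omega]
    rw [Nat.add_mod_right]
  unfold firstLen
  split_ifs with hm
  · -- k ∣ n and n > k, so n ≥ 2k
    have h0 : (n - k) % k = 0 := by omega
    rcases Nat.lt_or_ge (n - k) k with hlt | hge
    · have := Nat.mod_eq_of_lt hlt
      omega
    · omega
  · have : n % k ≤ n - k := hmod ▸ Nat.mod_le (n - k) k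
    omega

lemma firstLen_eq_sub (k n : Nat) (_hk : 0 < k) (h : k < n) : firstLen k (n - k) = firstLen k n := by
  have hmod : (n - k) % k = n % k := by
    conv_rhs => rw [show n = (n - k) + k by omega]
    rw [Nat.add_mod_right]
  unfold firstLen
  rw [hmod]

-- "last chunk" lemma: on a nonempty list whose length is a multiple of k,
-- chunking peels the last k elements off as the final group
lemma chunksOf_last (k : Nat) (hk : 0 < k) :
    ∀ (n : Nat) (u : List Char), u.length ≤ n → 0 < u.length → u.length % k = 0 →
      chunksOf k hk u = chunksOf k hk (u.take (u.length - k)) ++ [u.drop (u.length - k)] := by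
  intro n
  induction n with
  | zero => intro u hu h0 _; omega
  | succ n ih =>
    intro u hu h0 hmod
    match u with
    | [] => simp at h0
    | c :: t =>
      set L := (c :: t).length with hL
      have hkL : k ≤ L := by
        rcases Nat.lt_or_ge L k with hlt | hge
        · have := Nat.mod_eq_of_lt hlt
          omega
        · exact hge
      rcases Nat.lt_or_ge L (k + 1) with hle | hgt
      · -- L = k : a single chunk
        have hLk : L = k := by omega
        rw [chunksOf]
        have hdrop : (c :: t).drop k = [] := by
          apply List.drop_eq_nil_of_le
          omega
        have htake : (c :: t).take k = c :: t := by
          apply List.take_of_length_le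
          omega
        rw [hdrop, htake]
        have h1 : L - k = 0 := by omega
        rw [h1]
        simp [chunksOf]
      · -- L ≥ 2k (since k ∣ L and L > k)
        have hLk2 : 2 * k ≤ L := by
          have hmod2 : (L - k) % k = L % k := by
            conv_rhs => rw [show L = (L - k) + k by omega]
            rw [Nat.add_mod_right]
          rcases Nat.lt_or_ge (L - k) k with hlt | hge
          · have := Nat.mod_eq_of_lt hlt
            omega
          · omega
        rw [chunksOf]
        have hdt : ((c :: t).drop k).length = L - k := by
          simp [← hL]
        have hmod2 : (L - k) % k = 0 := by
          have h2 : (L - k) % k = L % k := by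
            conv_rhs => rw [show L = (L - k) + k by omega]
            rw [Nat.add_mod_right]
          omega
        have ihd := ih ((c :: t).drop k) (by omega) (by omega) (by rw [hdt]; exact hmod2)
        rw [ihd]
        -- now rewrite the RHS into the same shape
        have htk : ((c :: t).take (L - k)).length = L - k := by
          rw [List.length_take, ← hL]
          omega
        have hne : (c :: t).take (L - k) ≠ [] := by
          intro hnil
          rw [hnil] at htk
          simp at htk
          omega
        match htke : (c :: t).take (L - k) with
        | [] => exact absurd htke hne
        | d :: r =>
          rw [chunksOf, ← htke]
          have e1 : ((c :: t).take (L - k)).take k = (c :: t).take k := by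
            rw [List.take_take]
            congr 1
            omega
          have e2 : ((c :: t).take (L - k)).drop k = ((c :: t).drop k).take (L - k - k) := by
            rw [List.drop_take]
          have e3 : ((c :: t).drop k).take (((c :: t).drop k).length - k) = ((c :: t).drop k).take (L - k - k) := by
            rw [hdt]
          have e4 : ((c :: t).drop k).drop (((c :: t).drop k).length - k) = (c :: t).drop (L - k) := by
            rw [hdt, List.drop_drop]
            congr 1
            omega
          rw [e1, e2, e3, e4]
          simp

-- A's loop computes the leading group followed by the k-chunks of the rest
lemma loopA_eq (k : Nat) (hk : 0 < k) (h : 1 ≤ ((k : Nat) : Int)) :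
    ∀ (n : Nat) (l : List Char), l.length ≤ n → ∀ (acc : List (List Char)),
      doCommaLoop (k : Int) h l acc =
        (l.take (firstLen k l.length) :: chunksOf k hk (l.drop (firstLen k l.length))) ++ acc := by
  intro n
  induction n with
  | zero =>
    intro l hl acc
    have hnil : l = [] := List.eq_nil_of_length_eq_zero (by omega)
    subst hnil
    rw [doCommaLoop]
    simp [chunksOf]
  | succ n ih =>
    intro l hl acc
    rw [doCommaLoop]
    split_ifs with hle
    · -- l.length ≤ k : last iteration
      have hlk : l.length ≤ k := by exact_mod_cast hle
      have hf := firstLen_ge_of_le k l.length hk hlk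
      have ht : l.take (firstLen k l.length) = l := List.take_of_length_le hf
      have hd : l.drop (firstLen k l.length) = [] := List.drop_eq_nil_of_le hf
      rw [ht, hd]
      simp [chunksOf]
    · -- l.length > k : peel the last k characters
      have hgt : k < l.length := by omega
      have hsl1 : PySem.List.slice l none (some (-((k : Nat) : Int))) = l.take (l.length - k) :=
        PySem.List.slice_to_neg_natCast l k hk
      have hsl2 : PySem.List.slice l (some (-((k : Nat) : Int))) none = l.drop (l.length - k) :=
        PySem.List.slice_from_neg_natCast l k hk
      rw [hsl1, hsl2]
      have hlen : (l.take (l.length - k)).length = l.length - k := by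
        simp
      rw [ih (l.take (l.length - k)) (by omega) (l.drop (l.length - k) :: acc)]
      rw [hlen]
      have hfe : firstLen k (l.length - k) = firstLen k l.length := firstLen_eq_sub k l.length hk hgt
      rw [hfe]
      set f := firstLen k l.length with hfdef
      have hfle : f ≤ l.length - k := firstLen_le_sub k l.length hk hgt
      have e1 : (l.take (l.length - k)).take f = l.take f := by
        rw [List.take_take]
        congr 1
        omega
      have e2 : (l.take (l.length - k)).drop f = (l.drop f).take (l.length - k - f) := List.drop_take
      rw [e1, e2]
      have hulen : (l.drop f).length = l.length - f := by simp
      have humod : (l.drop f).length % k = 0 := by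
        rw [hulen, hfdef]
        exact firstLen_mod k l.length hk
      have hupos : 0 < (l.drop f).length := by
        rw [hulen]
        omega
      have hlast := chunksOf_last k hk (l.drop f).length (l.drop f) le_rfl hupos humod
      rw [hulen] at hlast
      have e3 : (l.drop f).take (l.length - f - k) = (l.drop f).take (l.length - k - f) := by
        congr 1
        omega
      have e4 : (l.drop f).drop (l.length - f - k) = l.drop (l.length - k) := by
        rw [List.drop_drop]
        congr 1
        omega
      rw [e3, e4] at hlast
      rw [hlast]
      simp

-- one step of range(first, len, interval) for a positive step
lemma pyRange_pos_cons (a b s : Int) (hs : 0 < s) (hab : a < b) :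
    PySem.List.pyRange a b s = a :: PySem.List.pyRange (a + s) b s := by
  rw [PySem.List.pyRange_of_pos a b hs, PySem.List.pyRange_of_pos (a + s) b hs, if_pos hab]
  have hcount : ((b - a + s - 1) / s).toNat
      = (if a + s < b then ((b - (a + s) + s - 1) / s).toNat else 0) + 1 := by
    split_ifs with h2
    · have he : (b - a + s - 1) / s = (b - (a + s) + s - 1) / s + 1 := by
        have : b - a + s - 1 = (b - (a + s) + s - 1) + 1 * s := by ring
        rw [this, Int.add_mul_ediv_right _ _ (by omega)]
      have hnn : 0 ≤ (b - (a + s) + s - 1) / s := Int.ediv_nonneg (by omega) (by omega)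
      omega
    · have h1 : (b - a + s - 1) / s = 1 := by
        rw [← PySem.Int.floordiv_eq_ediv_of_pos hs]
        rw [PySem.Int.floordiv_eq_iff_of_pos hs]
        exact ⟨by omega, by omega⟩
      omega
  rw [hcount, List.range_succ_eq_map]
  simp only [List.map_cons, List.map_map]
  congr 1
  · simp
  · apply List.map_congr_left
    intro x _
    simp only [Function.comp]
    push_cast
    ring

-- B's range comprehension computes the k-chunks of s.drop f
lemma rangeB_eq (k : Nat) (hk : 0 < k) :
    ∀ (n : Nat) (s : List Char) (f : Nat), s.length - f ≤ n → (s.length - f) % k = 0 →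
      (PySem.List.pyRange (f : Int) (s.length : Int) (k : Int)).map
          (fun i => PySem.List.slice s (some i) (some (i + (k : Int))))
        = chunksOf k hk (s.drop f) := by
  intro n
  induction n with
  | zero =>
    intro s f hle _
    have hfs : s.length ≤ f := by omega
    have hr : PySem.List.pyRange (f : Int) (s.length : Int) (k : Int) = [] := by
      rw [PySem.List.pyRange_of_pos _ _ (by exact_mod_cast hk)]
      rw [if_neg (by exact_mod_cast Nat.not_lt.mpr hfs)]
      simp
    rw [hr]
    have : s.drop f = [] := List.drop_eq_nil_of_le hfs
    rw [this]
    simp [chunksOf]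
  | succ n ih =>
    intro s f hle hmod
    rcases Nat.lt_or_ge f s.length with hlt | hge
    · -- f < len, so len - f ≥ k
      have hkle : k ≤ s.length - f := by
        rcases Nat.lt_or_ge (s.length - f) k with h2 | h2
        · have := Nat.mod_eq_of_lt h2
          omega
        · exact h2
      rw [pyRange_pos_cons (f : Int) (s.length : Int) (k : Int) (by exact_mod_cast hk) (by exact_mod_cast hlt)]
      rw [List.map_cons]
      have hsl : PySem.List.slice s (some (f : Int)) (some ((f : Int) + (k : Int))) = (s.drop f).take k :=
        PySem.List.slice_natCast_add s f k
      rw [hsl]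
      have hcast : (f : Int) + (k : Int) = ((f + k : Nat) : Int) := by push_cast; ring
      rw [hcast]
      rw [ih s (f + k) (by omega) (by
        have h3 : (s.length - f - k) % k = (s.length - f) % k := by
          conv_rhs => rw [show s.length - f = (s.length - f - k) + k by omega]
          rw [Nat.add_mod_right]
        have h4 : s.length - (f + k) = s.length - f - k := by omega
        rw [h4, h3]
        exact hmod)]
      have hdd : s.drop (f + k) = (s.drop f).drop k := by
        rw [List.drop_drop]
      rw [hdd]
      have hne : s.drop f ≠ [] := by
        intro hnil
        have : s.length - f = 0 := by
          have := congrArg List.length hnil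
          simp at this
          omega
        omega
      match hdf : s.drop f with
      | [] => exact absurd hdf hne
      | c :: t => rw [chunksOf]
    · -- f ≥ len : empty range, empty chunks
      have hr : PySem.List.pyRange (f : Int) (s.length : Int) (k : Int) = [] := by
        rw [PySem.List.pyRange_of_pos _ _ (by exact_mod_cast hk)]
        rw [if_neg (by exact_mod_cast Nat.not_lt.mpr hge)]
        simp
      rw [hr]
      have : s.drop f = [] := List.drop_eq_nil_of_le hge
      rw [this]
      simp [chunksOf]

-- ===== VERDICT (by name: the statement is the Claim_ definition above) =====
theorem do_comma_spec : Claim_equal_do_comma := by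
  unfold Claim_equal_do_comma
  intro nstr comma_char interval _
  unfold Spec_do_comma do_comma do_comma_alt
  by_cases hlt : interval < 1
  · simp [hlt]
  · obtain ⟨k, rfl⟩ : ∃ k : Nat, interval = (k : Int) := ⟨interval.toNat, by omega⟩
    have hk : 0 < k := by omega
    rw [dif_neg hlt, if_neg hlt]
    simp only [PySem.Int.mod_natCast]
    set l := nstr.toList with hl
    have hfirst : (if ((l.length % k : Nat) : Int) = 0 then ((k : Nat) : Int) else ((l.length % k : Nat) : Int))
        = ((firstLen k l.length : Nat) : Int) := by
      unfold firstLen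
      by_cases hm : l.length % k = 0
      · simp [hm]
      · rw [if_neg (by exact_mod_cast hm), if_neg hm]
    rw [hfirst]
    rw [PySem.List.slice_to_natCast l (firstLen k l.length)]
    rw [rangeB_eq k hk (l.length) l (firstLen k l.length) (Nat.sub_le _ _) (firstLen_mod k l.length hk)]
    rw [loopA_eq k hk (by omega) l.length l le_rfl []]
    simp
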